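-- pv_equiv track=rewrite | github.com/bmolparia/metaproteomics | analysis/lookup_reverse_peptides.py | check_parents_for_decoy
-- ===== SOURCE A (Python) =====
-- def check_parents_for_decoy(parents_of_peptide):
--     # returns 0 if none of the parents are decoy proteins
--     # returns 1 if all of the parents are decoy proteins
--     # returns 2 if some (but not all) of the parents are decoy proteins
--
--     number_of_decoy_parents = len([parent for parent in parents_of_peptide if 'd' in parent])
--
--     if number_of_decoy_parents == 0:
--         # no decoy parents
--         return 0
--     elif number_of_decoy_parents == len(parents_of_peptide):
--         # all parents are decoy
--         return 1
--     else:
--         # some (but not all) parents are decoy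
--         return 2
-- ===== SOURCE B (Python) =====
-- def check_parents_for_decoy(parents_of_peptide):
--     # returns 0 if none of the parents are decoy proteins
--     # returns 1 if all of the parents are decoy proteins
--     # returns 2 if some (but not all) of the parents are decoy proteins
--     has_decoy = any('d' in parent for parent in parents_of_peptide)
--     has_clean = any('d' not in parent for parent in parents_of_peptide)
--     if not has_decoy:
--         return 0
--     elif not has_clean:
--         return 1
--     else:
--         return 2
-- ===== Notes on version B (the rewrite author's own statement) =====
-- stated objective: idiomatic
-- what changed: Replaces the decoy count and its comparisons against 0 and len(parents) with two short-circuiting existence checks (any decoy parent / any non-decoy parent); no count or len is ever computed.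
import Mathlib
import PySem

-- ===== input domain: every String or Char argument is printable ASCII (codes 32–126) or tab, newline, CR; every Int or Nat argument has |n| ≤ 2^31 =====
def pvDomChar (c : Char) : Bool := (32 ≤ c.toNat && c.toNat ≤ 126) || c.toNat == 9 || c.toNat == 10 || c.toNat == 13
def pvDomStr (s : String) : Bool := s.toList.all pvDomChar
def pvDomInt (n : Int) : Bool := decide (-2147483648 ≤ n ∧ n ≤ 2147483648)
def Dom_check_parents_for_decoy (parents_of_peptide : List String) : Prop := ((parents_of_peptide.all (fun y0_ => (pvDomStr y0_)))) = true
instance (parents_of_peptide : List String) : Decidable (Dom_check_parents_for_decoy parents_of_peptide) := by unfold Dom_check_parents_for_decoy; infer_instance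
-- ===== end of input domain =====

-- ===== PORT A =====
-- A: count decoy parents, compare the count with 0 and with the list length.
def check_parents_for_decoy (parents_of_peptide : List String) : Int :=
  let number_of_decoy_parents : Int :=
    ((parents_of_peptide.filter (fun parent => PySem.Str.isIn "d" parent)).length : Int)
  if number_of_decoy_parents = 0 then 0
  else if number_of_decoy_parents = (parents_of_peptide.length : Int) then 1
  else 2

-- ===== PORT B =====
-- B (idiomatic): two short-circuit existence checks (any decoy / any clean) instead of
-- counting decoy parents and comparing the count with 0 and with len.
def check_parents_for_decoy_alt (parents_of_peptide : List String) : Int :=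
  let has_decoy := parents_of_peptide.any (fun parent => PySem.Str.isIn "d" parent)
  let has_clean := parents_of_peptide.any (fun parent => !(PySem.Str.isIn "d" parent))
  if !has_decoy then 0
  else if !has_clean then 1
  else 2

-- ===== PRECONDITION & SPEC =====
def Spec_check_parents_for_decoy (parents_of_peptide : List String) (out : Int) : Prop := out = check_parents_for_decoy_alt parents_of_peptide
instance (parents_of_peptide : List String) (out : Int) : Decidable (Spec_check_parents_for_decoy parents_of_peptide out) := by unfold Spec_check_parents_for_decoy; infer_instance

-- ===== CLAIM (what is proved, stated in full; the proofs are below) =====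
def Claim_equal_check_parents_for_decoy : Prop := ∀ (parents_of_peptide : List String), Dom_check_parents_for_decoy parents_of_peptide → Spec_check_parents_for_decoy parents_of_peptide (check_parents_for_decoy parents_of_peptide)

-- ===== LEMMAS AND PROOFS =====

-- ===== VERDICT (by name: the statement is the Claim_ definition above) =====
-- The A-side conditions "count = 0" and "count = len" and the B-side existence checks
-- normalize to the same propositions about membership in the list; simp closes the goal.
theorem check_parents_for_decoy_spec : Claim_equal_check_parents_for_decoy := by
  intro xs _
  unfold Spec_check_parents_for_decoy check_parents_for_decoy check_parents_for_decoy_alt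
  simp [List.length_filter_eq_length_iff, Int.natCast_eq_zero,
        List.length_eq_zero_iff, List.filter_eq_nil_iff]
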